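-- pv_equiv track=rewrite | github.com/josy0319/BOJ-SW-Expert-Academy | Programmers/탑.py | solution
-- ===== SOURCE A (Python) =====
-- def solution(heights):
--     answer = []
--     #4 7 5 9 6
--     for i in range(len(heights)-1,-1,-1):
--         for j in range(i-1,-1,-1):
--             if heights[i] < heights[j]:
--                 answer.append(j+1)
--                 break
--             if j == 0:
--                 answer.append(0)
--                 break
--     answer.append(0)
--     answer.reverse()
--     return answer
-- ===== SOURCE B (Python) =====
-- def solution(heights):
--     answer = []
--     stack = []  # (height, 1-based index), heights strictly decreasing bottom-to-top
--     for idx, h in enumerate(heights, 1):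
--         while stack and stack[-1][0] <= h:
--             stack.pop()
--         answer.append(stack[-1][1] if stack else 0)
--         stack.append((h, idx))
--     return answer
-- ===== Notes on version B (the rewrite author's own statement) =====
-- stated objective: faster
-- what changed: Replaced the quadratic backward scan (for each tower, rescan all towers to its left) by a single left-to-right pass with a monotonic strictly-decreasing stack of (height, index) pairs.
-- intended difference: On the empty list A returns a one-element answer containing a single zero entry fabricated by its unconditional trailing append, while B returns the empty list, which is intended since the answer must have one entry per tower. — e.g. on solution([]): A returns [0], B returns []
import Mathlib
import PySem

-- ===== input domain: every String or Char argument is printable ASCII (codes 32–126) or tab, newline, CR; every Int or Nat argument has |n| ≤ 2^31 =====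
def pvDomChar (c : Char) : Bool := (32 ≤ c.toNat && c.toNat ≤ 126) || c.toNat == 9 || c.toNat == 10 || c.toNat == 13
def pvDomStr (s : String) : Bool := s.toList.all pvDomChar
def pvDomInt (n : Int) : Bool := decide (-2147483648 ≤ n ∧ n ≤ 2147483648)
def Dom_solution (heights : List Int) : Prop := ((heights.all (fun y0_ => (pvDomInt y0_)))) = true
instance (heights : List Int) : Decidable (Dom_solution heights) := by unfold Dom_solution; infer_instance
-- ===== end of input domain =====

-- B replaces A's quadratic per-tower backward rescan by one left-to-right pass with a
-- monotonic decreasing stack (measured faster); on the empty list the two differ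
-- (see D_solution below).

-- ===== PORT A =====
-- heights[i] with i always in range inside A's loops (0 ≤ j < i < len); pyGetD is exact there.
def pvGet (heights : List Int) (i : Int) : Int := PySem.List.pyGetD heights i 0

-- A's inner loop over j = i-1, …, 0 with its two breaks (returns the appended value, if any).
def innerA (heights : List Int) (hi : Int) : List Int → Option Int
  | [] => none
  | j :: rest =>
    if hi < pvGet heights j then some (j + 1)
    else if j = 0 then some 0
    else innerA heights hi rest

def solution (heights : List Int) : List Int :=
  let n : Int := heights.length
  let answer := (PySem.List.pyRange (n - 1) (-1) (-1)).foldl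
    (fun acc i =>
      match innerA heights (pvGet heights i) (PySem.List.pyRange (i - 1) (-1) (-1)) with
      | some v => acc ++ [v]
      | none => acc) []
  (answer ++ [0]).reverse

-- ===== PORT B =====
-- Source B's `while stack and stack[-1][0] <= h: stack.pop()` (stack top at the head here).
def popLe (h : Int) : List (Int × Int) → List (Int × Int)
  | [] => []
  | (hh, j) :: rest => if hh ≤ h then popLe h rest else (hh, j) :: rest

-- one iteration of Source B's for-loop; state = (answer, stack, idx from enumerate(heights, 1))
def stepB (st : List Int × List (Int × Int) × Int) (h : Int) : List Int × List (Int × Int) × Int :=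
  let s := popLe h st.2.1
  (st.1 ++ [match s with | [] => 0 | (_, j) :: _ => j], (h, st.2.2) :: s, st.2.2 + 1)

def solution_alt (heights : List Int) : List Int :=
  (heights.foldl stepB ([], [], 1)).1

-- ===== PRECONDITION & SPEC =====
-- On the empty list A returns a one-element answer containing a single zero entry
-- fabricated by its unconditional trailing append, while B returns the empty list,
-- which is intended since the answer must have one entry per tower.
def D_solution (heights : List Int) : Prop := heights = []
instance (heights : List Int) : Decidable (D_solution heights) := by unfold D_solution; infer_instance

def Spec_solution (heights : List Int) (out : List Int) : Prop :=
  ¬ D_solution heights → out = solution_alt heights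
instance (heights : List Int) (out : List Int) : Decidable (Spec_solution heights out) := by
  unfold Spec_solution; infer_instance

def pvDiffWitness_solution : List Int := []
def pvDiffWitnessOut_solution : (List Int) × (List Int) := ([0], [])

-- ===== CLAIM (what is proved, stated in full; the proofs are below) =====
def Claim_unchanged_solution : Prop :=
  ∀ (heights : List Int), Dom_solution heights → Spec_solution heights (solution heights)
def Claim_changed_solution : Prop :=
  Dom_solution (pvDiffWitness_solution) ∧ D_solution (pvDiffWitness_solution) ∧
  solution (pvDiffWitness_solution) = pvDiffWitnessOut_solution.1 ∧
  solution_alt (pvDiffWitness_solution) = pvDiffWitnessOut_solution.2 ∧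
  pvDiffWitnessOut_solution.1 ≠ pvDiffWitnessOut_solution.2
def Claim_exact_solution : Prop :=
  ∀ (heights : List Int), Dom_solution heights → D_solution heights →
    solution heights ≠ solution_alt heights

-- ===== LEMMAS AND PROOFS =====

-- nearest taller to the left: rp lists (height, 1-based index) pairs, nearest first
def nearest (c : Int) (rp : List (Int × Int)) : Int :=
  match rp.find? (fun y => decide (c < y.1)) with
  | some y => y.2
  | none => 0

-- the pairs still "visible" from the right end of rp (strictly increasing heights)
def skyline : List (Int × Int) → List (Int × Int)
  | [] => []
  | x :: t => x :: skyline (t.filter (fun y => decide (x.1 < y.1)))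
termination_by l => l.length
decreasing_by
  simp only [List.length_cons, List.length_unattach]
  exact Nat.lt_succ_of_le (le_trans (List.length_filter_le _ _) (by simp))

-- reference computation: answers for the remaining towers t, given the reversed prefix rp
def goldGo : List (Int × Int) → List Int → Int → List Int
  | _, [], _ => []
  | rp, h :: t, idx => nearest h rp :: goldGo ((h, idx) :: rp) t (idx + 1)

-- reversed prefix of the first k towers
def rpOf (heights : List Int) : Nat → List (Int × Int)
  | 0 => []
  | k + 1 => (pvGet heights k, (k : Int) + 1) :: rpOf heights k

-- the intended answer for tower i
def F (heights : List Int) (i : Nat) : Int :=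
  nearest (pvGet heights (i : Int)) (rpOf heights i)

theorem skyline_subset (l : List (Int × Int)) : ∀ y ∈ skyline l, y ∈ l := by
  match l with
  | [] => simp [skyline]
  | x :: t =>
    intro y hy
    rw [skyline] at hy
    rcases List.mem_cons.mp hy with h | h
    · exact h ▸ List.mem_cons_self
    · exact List.mem_cons_of_mem _ (List.mem_of_mem_filter (skyline_subset _ y h))
termination_by l.length
decreasing_by simp only [List.length_cons]; exact Nat.lt_succ_of_le (List.length_filter_le _ _)

theorem skyline_pairwise (l : List (Int × Int)) :
    (skyline l).Pairwise (fun a b => a.1 < b.1) := by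
  match l with
  | [] => simp [skyline]
  | x :: t =>
    rw [skyline]
    refine List.pairwise_cons.mpr ⟨?_, skyline_pairwise _⟩
    intro y hy
    have := List.mem_filter.mp (skyline_subset _ y hy)
    simpa using this.2
termination_by l.length
decreasing_by simp only [List.length_cons]; exact Nat.lt_succ_of_le (List.length_filter_le _ _)

theorem skyline_filter (h : Int) (l : List (Int × Int)) :
    skyline (l.filter (fun y => decide (h < y.1))) =
      (skyline l).filter (fun y => decide (h < y.1)) := by
  match l with
  | [] => simp [skyline]
  | x :: t =>
    by_cases hx : h < x.1
    · rw [List.filter_cons_of_pos (by simpa using hx), skyline, skyline]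
      rw [List.filter_cons_of_pos (by simpa using hx)]
      congr 1
      · rw [List.filter_filter]
        rw [List.filter_congr (l := t)
            (q := fun y => decide (x.1 < y.1)) (by intro y _; simp; omega)]
        symm
        apply List.filter_eq_self.mpr
        intro y hy
        have := List.mem_filter.mp (skyline_subset _ y hy)
        simp at this ⊢
        omega
    · rw [List.filter_cons_of_neg (by simpa using hx), skyline]
      rw [List.filter_cons_of_neg (by simpa using hx)]
      rw [← skyline_filter h (t.filter (fun y => decide (x.1 < y.1))), List.filter_filter]
      congr 1
      apply List.filter_congr
      intro y _
      by_cases hy : h < y.1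
      · have : x.1 < y.1 := by omega
        simp [hy, this]
      · simp [hy]
termination_by l.length
decreasing_by
  · simp only [List.length_cons]; exact Nat.lt_succ_of_le (List.length_filter_le _ _)

theorem find?_filter_of_imp (p q : Int × Int → Bool) (l : List (Int × Int))
    (hpq : ∀ y, p y = true → q y = true) :
    (l.filter q).find? p = l.find? p := by
  induction l with
  | nil => rfl
  | cons a t ih =>
    by_cases hq : q a = true
    · rw [List.filter_cons_of_pos hq, List.find?_cons, List.find?_cons]
      cases hp : p a <;> simp [ih]
    · have hp : p a = false := by
        cases hpa : p a
        · rfl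
        · exact absurd (hpq a hpa) hq
      rw [List.filter_cons_of_neg hq, List.find?_cons, hp, ih]

theorem find?_skyline (c : Int) (l : List (Int × Int)) :
    (skyline l).find? (fun y => decide (c < y.1)) = l.find? (fun y => decide (c < y.1)) := by
  match l with
  | [] => simp [skyline]
  | x :: t =>
    rw [skyline]
    by_cases hc : c < x.1
    · simp [hc]
    · have hrec := find?_skyline c (t.filter (fun y => decide (x.1 < y.1)))
      have himp := find?_filter_of_imp (fun y => decide (c < y.1))
        (fun y => decide (x.1 < y.1)) t (by intro y hy; simp at hy ⊢; omega)
      simp [hc, hrec, himp]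
termination_by l.length
decreasing_by simp only [List.length_cons]; exact Nat.lt_succ_of_le (List.length_filter_le _ _)

theorem popLe_eq_filter (h : Int) (l : List (Int × Int))
    (hl : l.Pairwise (fun a b => a.1 < b.1)) :
    popLe h l = l.filter (fun y => decide (h < y.1)) := by
  induction l with
  | nil => rfl
  | cons a t ih =>
    obtain ⟨ha, ht⟩ := List.pairwise_cons.mp hl
    obtain ⟨hh, j⟩ := a
    by_cases hle : hh ≤ h
    · rw [List.filter_cons_of_neg (by simp; omega)]
      simpa [popLe, hle] using ih ht
    · rw [List.filter_cons_of_pos (by simp; omega)]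
      simp only [popLe, if_neg hle]
      congr 1
      symm
      apply List.filter_eq_self.mpr
      intro y hy
      have := ha y hy
      simp at this ⊢
      omega

theorem head?_filter_eq_find? (p : Int × Int → Bool) (l : List (Int × Int)) :
    (l.filter p).head? = l.find? p := by
  induction l with
  | nil => rfl
  | cons a t ih =>
    rw [List.find?_cons]
    cases hp : p a
    · rw [List.filter_cons_of_neg (by simp [hp]), ih]
    · rw [List.filter_cons_of_pos hp]
      rfl

theorem foldl_stepB (t : List Int) : ∀ (rp : List (Int × Int)) (acc : List Int) (idx : Int),
    (t.foldl stepB (acc, skyline rp, idx)).1 = acc ++ goldGo rp t idx := by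
  induction t with
  | nil => intro rp acc idx; simp [goldGo]
  | cons h t2 ih =>
    intro rp acc idx
    have hpop : popLe h (skyline rp) = (skyline rp).filter (fun y => decide (h < y.1)) :=
      popLe_eq_filter _ _ (skyline_pairwise rp)
    have hsky : (h, idx) :: popLe h (skyline rp) = skyline ((h, idx) :: rp) := by
      rw [hpop, skyline, skyline_filter]
    have hval : (match popLe h (skyline rp) with | [] => (0 : Int) | (_, j) :: _ => j) =
        nearest h rp := by
      rw [hpop]
      unfold nearest
      rw [← find?_skyline, ← head?_filter_eq_find?]
      cases (skyline rp).filter (fun y => decide (h < y.1)) with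
      | nil => rfl
      | cons a t3 => rfl
    rw [List.foldl_cons]
    show (t2.foldl stepB
        (acc ++ [match popLe h (skyline rp) with | [] => (0 : Int) | (_, j) :: _ => j],
         (h, idx) :: popLe h (skyline rp), idx + 1)).1 = acc ++ goldGo rp (h :: t2) idx
    rw [hval, hsky, ih ((h, idx) :: rp) (acc ++ [nearest h rp]) (idx + 1)]
    simp [goldGo]

theorem innerA_eq (heights : List Int) (hi : Int) (k : Nat) :
    innerA heights hi (PySem.List.pyRange (k : Int) (-1) (-1)) =
      some (nearest hi (rpOf heights (k + 1))) := by
  induction k with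
  | zero =>
    rw [PySem.List.pyRange_neg_one_cons (by omega),
        PySem.List.pyRange_neg_one_eq_nil (by omega)]
    by_cases h0 : hi < pvGet heights 0
    · simp [innerA, h0, rpOf, nearest]
    · simp [innerA, h0, rpOf, nearest]
  | succ k ih =>
    rw [PySem.List.pyRange_neg_one_cons (by omega)]
    have hcast : ((k : Int) + 1) - 1 = (k : Int) := by omega
    by_cases h0 : hi < pvGet heights ((k : Int) + 1)
    · simp only [innerA]
      rw [if_pos (by push_cast; exact h0)]
      have : nearest hi (rpOf heights (k + 1 + 1)) = (k : Int) + 1 + 1 := by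
        simp [rpOf, nearest, h0]
      rw [this]
      push_cast
      ring_nf
    · simp only [innerA]
      rw [if_neg (by push_cast; exact h0), if_neg (by push_cast; omega)]
      rw [show (((k + 1 : Nat) : Int)) - 1 = (k : Int) by push_cast; ring]
      rw [ih]
      congr 1
      simp [rpOf, nearest, h0]

theorem foldA_eq (heights : List Int) (k : Nat) (hk : 1 ≤ k) : ∀ acc : List Int,
    ((PySem.List.pyRange ((k : Int) - 1) (-1) (-1)).foldl
      (fun acc i =>
        match innerA heights (pvGet heights i) (PySem.List.pyRange (i - 1) (-1) (-1)) with
        | some v => acc ++ [v]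
        | none => acc) acc) ++ [(0 : Int)] =
      acc ++ ((List.range k).map (F heights)).reverse := by
  induction k, hk using Nat.le_induction with
  | base =>
    intro acc
    rw [show ((1 : Nat) : Int) - 1 = (0 : Int) by norm_num]
    rw [PySem.List.pyRange_neg_one_cons (by omega),
        PySem.List.pyRange_neg_one_eq_nil (by omega)]
    have : PySem.List.pyRange ((0 : Int) - 1) (-1) (-1) = [] :=
      PySem.List.pyRange_neg_one_eq_nil (by omega)
    simp only [List.foldl_cons, List.foldl_nil, this, innerA]
    have hF0 : F heights 0 = 0 := by simp [F, rpOf, nearest]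
    simp [hF0]
  | succ k hk1 ih =>
    intro acc
    rw [show (((k + 1 : Nat)) : Int) - 1 = (k : Int) by push_cast; ring]
    rw [PySem.List.pyRange_neg_one_cons (by omega)]
    rw [List.foldl_cons]
    obtain ⟨m, rfl⟩ : ∃ m, k = m + 1 := ⟨k - 1, by omega⟩
    have hinner : innerA heights (pvGet heights ((m + 1 : Nat) : Int))
        (PySem.List.pyRange (((m + 1 : Nat) : Int) - 1) (-1) (-1)) =
        some (F heights (m + 1)) := by
      rw [show (((m + 1 : Nat)) : Int) - 1 = (m : Int) by push_cast; ring]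
      rw [innerA_eq]
      rfl
    rw [hinner]
    rw [ih (acc ++ [F heights (m + 1)])]
    simp [List.range_succ]

theorem goldGo_eq (heights : List Int) : ∀ (t : List Int) (k : Nat),
    heights.drop k = t →
    goldGo (rpOf heights k) t ((k : Int) + 1) =
      (List.range t.length).map (fun d => F heights (k + d)) := by
  intro t
  induction t with
  | nil => intro k _; simp [goldGo]
  | cons h t2 ih =>
    intro k hdrop
    have hk : k < heights.length := by
      by_contra hge
      rw [List.drop_eq_nil_of_le (by omega)] at hdrop
      simp at hdrop
    have hget : pvGet heights (k : Int) = h := by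
      unfold pvGet
      rw [PySem.List.pyGetD_natCast]
      have hsome : heights[k]? = some h := by
        have := congrArg List.head? hdrop
        rwa [List.head?_drop] at this
      rw [List.getD_eq_getElem?_getD, hsome]
      rfl
    have hdrop2 : heights.drop (k + 1) = t2 := by
      have h2 := congrArg List.tail hdrop
      simpa [List.tail_drop] using h2
    rw [goldGo]
    have hrp : (h, (k : Int) + 1) :: rpOf heights k = rpOf heights (k + 1) := by
      simp [rpOf, hget]
    have hidx : (k : Int) + 1 + 1 = ((k + 1 : Nat) : Int) + 1 := by push_cast; ring
    rw [hrp, hidx, ih (k + 1) hdrop2]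
    have hF : nearest h (rpOf heights k) = F heights k := by rw [F, hget]
    rw [hF]
    simp only [List.length_cons, List.range_succ_eq_map, List.map_cons, List.map_map]
    refine List.cons_eq_cons.mpr ⟨by simp, ?_⟩
    apply List.map_congr_left
    intro d _
    simp only [Function.comp_apply]
    rw [show k + 1 + d = k + d.succ from by omega]

-- ===== VERDICT (by name: the statement is the Claim_ definition above) =====
theorem solution_spec : Claim_unchanged_solution := by
  intro heights _ hne
  have hlen : 1 ≤ heights.length := by
    unfold D_solution at hne
    cases heights with
    | nil => exact absurd rfl hne
    | cons a t => simp
  show solution heights = solution_alt heights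
  have hA := foldA_eq heights heights.length hlen []
  have hsk : skyline ([] : List (Int × Int)) = [] := by rw [skyline]
  have hB := foldl_stepB heights [] [] 1
  rw [hsk] at hB
  have hG := goldGo_eq heights heights 0 (by simp)
  simp only [rpOf] at hG
  rw [show ((0 : Nat) : Int) + 1 = (1 : Int) from by norm_num] at hG
  unfold solution solution_alt
  simp only [hA]
  rw [hB, hG]
  simp

theorem solution_changed : Claim_changed_solution := by
  unfold Claim_changed_solution; decide

theorem solution_tight : Claim_exact_solution := by
  intro heights _ hD
  unfold D_solution at hD
  subst hD
  decide
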